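-- pv_equiv track=rewrite | github.com/maggiSauce/Central-Point-Pharmacy-Public | StudentForms/src/CSVtoStudentPDF.py | extractPhoneNumber
-- ===== SOURCE A (Python) =====
-- def extractPhoneNumber(numberString):
--     """
--     Extracts the first available phone number and returns it.
--     If no number is found, returns false
--     """
--
--     phoneNumber = ''
--     activeNumber = False
--
--     for char in numberString:
--         if char.isdigit() or char in '()- ':
--             phoneNumber += char
--             activeNumber = True
--         elif activeNumber:
--             break
--     if phoneNumber:
--         return phoneNumber
--     else:
--         return None
-- ===== SOURCE B (Python) =====
-- def _ok(c):
--     return c.isdigit() or c in '()- '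
--
-- def extractPhoneNumber(numberString):
--     # Two composed index scans instead of one flag-driven accumulating loop:
--     # find where the first run starts, find where it ends, slice it out.
--     n = len(numberString)
--     i = 0
--     while i < n and not _ok(numberString[i]):
--         i += 1
--     j = i
--     while j < n and _ok(numberString[j]):
--         j += 1
--     run = numberString[i:j]
--     return run or None
-- ===== Notes on version B (the rewrite author's own statement) =====
-- stated objective: alternative
-- what changed: Replaces A's single flag-driven accumulating loop (activeNumber flag + break) with two composed index scans — find where the first run starts, find where it ends — and a single slice; same O(n) cost, no per-character string concatenation.
import Mathlib
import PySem

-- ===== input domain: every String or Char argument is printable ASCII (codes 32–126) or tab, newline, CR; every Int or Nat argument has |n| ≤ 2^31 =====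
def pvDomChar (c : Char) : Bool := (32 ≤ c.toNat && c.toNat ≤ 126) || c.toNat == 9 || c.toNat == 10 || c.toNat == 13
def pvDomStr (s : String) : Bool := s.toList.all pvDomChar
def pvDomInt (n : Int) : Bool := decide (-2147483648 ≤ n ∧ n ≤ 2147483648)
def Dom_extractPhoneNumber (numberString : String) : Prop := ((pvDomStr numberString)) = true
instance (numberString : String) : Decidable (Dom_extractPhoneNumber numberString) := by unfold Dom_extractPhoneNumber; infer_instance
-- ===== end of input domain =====

-- B replaces A's flag-driven single loop with two composed phases (skip prefix, then take run); objective: simpler.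

-- ===== PORT A =====
def pnOk (c : Char) : Bool :=
  PySem.Chars.isdigit c || c == '(' || c == ')' || c == '-' || c == ' '

-- the for-loop of A: state (phoneNumber, activeNumber); `break` returns the accumulator
def pnLoopA (l : List Char) (phone : List Char) (active : Bool) : List Char :=
  match l with
  | [] => phone
  | c :: rest =>
    if pnOk c then pnLoopA rest (phone ++ [c]) true
    else if active then phone
    else pnLoopA rest phone false

def extractPhoneNumber (numberString : String) : Option String :=
  let phone := pnLoopA numberString.toList [] false
  if phone ≠ [] then some (String.ofList phone) else none

-- ===== PORT B =====
-- first while loop of B: advance i past leading chars failing pnOk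
def pnSkipIdx (l : List Char) (i : Nat) : Nat :=
  if h : i < l.length then
    if pnOk l[i] then i else pnSkipIdx l (i + 1)
  else i
termination_by l.length - i

-- second while loop of B: advance j past the run of chars satisfying pnOk
def pnEndIdx (l : List Char) (j : Nat) : Nat :=
  if h : j < l.length then
    if pnOk l[j] then pnEndIdx l (j + 1) else j
  else j
termination_by l.length - j

def extractPhoneNumber_alt (numberString : String) : Option String :=
  let l := numberString.toList
  let i := pnSkipIdx l 0
  let j := pnEndIdx l i
  let run := (l.drop i).take (j - i)   -- the slice numberString[i:j] (0 ≤ i ≤ j ≤ n)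
  if run ≠ [] then some (String.ofList run) else none

-- ===== PRECONDITION & SPEC =====
def Spec_extractPhoneNumber (numberString : String) (out : Option String) : Prop := out = extractPhoneNumber_alt numberString
instance (numberString : String) (out : Option String) : Decidable (Spec_extractPhoneNumber numberString out) := by unfold Spec_extractPhoneNumber; infer_instance

-- ===== CLAIM (what is proved, stated in full; the proofs are below) =====
def Claim_equal_extractPhoneNumber : Prop := ∀ (numberString : String), Dom_extractPhoneNumber numberString → Spec_extractPhoneNumber numberString (extractPhoneNumber numberString)

-- ===== LEMMAS AND PROOFS =====
-- functional forms of B's two index loops, used only in the proof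
def pnSkip (l : List Char) : List Char :=
  match l with
  | [] => []
  | c :: rest => if pnOk c then c :: rest else pnSkip rest

def pnTake (l : List Char) : List Char :=
  match l with
  | [] => []
  | c :: rest => if pnOk c then c :: pnTake rest else []

theorem pnLoopA_active (l : List Char) (acc : List Char) :
    pnLoopA l acc true = acc ++ pnTake l := by
  induction l generalizing acc with
  | nil => simp [pnLoopA, pnTake]
  | cons c rest ih =>
    by_cases h : pnOk c = true <;> simp [pnLoopA, pnTake, h, ih]

theorem pnLoopA_inactive (l : List Char) :
    pnLoopA l [] false = pnTake (pnSkip l) := by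
  induction l with
  | nil => simp [pnLoopA, pnSkip, pnTake]
  | cons c rest ih =>
    by_cases h : pnOk c = true
    · simp [pnLoopA, pnSkip, pnTake, h, pnLoopA_active]
    · simp [pnLoopA, pnSkip, h, ih]

theorem pnSkipIdx_drop (l : List Char) (i : Nat) :
    l.drop (pnSkipIdx l i) = pnSkip (l.drop i) := by
  induction hk : l.length - i generalizing i with
  | zero =>
    have h : ¬ i < l.length := by omega
    rw [pnSkipIdx, dif_neg h, List.drop_eq_nil_of_le (by omega), pnSkip]
  | succ n ih =>
    have h : i < l.length := by omega
    rw [pnSkipIdx, dif_pos h]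
    by_cases hok : pnOk l[i] = true
    · rw [if_pos hok, List.drop_eq_getElem_cons h, pnSkip, if_pos hok]
    · rw [if_neg hok, ih (i + 1) (by omega), List.drop_eq_getElem_cons h, pnSkip, if_neg hok]

theorem pnEndIdx_ge (l : List Char) (j : Nat) : j ≤ pnEndIdx l j := by
  induction hk : l.length - j generalizing j with
  | zero =>
    have h : ¬ j < l.length := by omega
    rw [pnEndIdx, dif_neg h]
  | succ n ih =>
    have h : j < l.length := by omega
    rw [pnEndIdx, dif_pos h]
    by_cases hok : pnOk l[j] = true
    · rw [if_pos hok]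
      have := ih (j + 1) (by omega)
      omega
    · rw [if_neg hok]

theorem pnEndIdx_take (l : List Char) (j : Nat) :
    (l.drop j).take (pnEndIdx l j - j) = pnTake (l.drop j) := by
  induction hk : l.length - j generalizing j with
  | zero =>
    have h : ¬ j < l.length := by omega
    rw [pnEndIdx, dif_neg h, List.drop_eq_nil_of_le (by omega)]
    simp [pnTake]
  | succ n ih =>
    have h : j < l.length := by omega
    rw [pnEndIdx, dif_pos h, List.drop_eq_getElem_cons h, pnTake]
    by_cases hok : pnOk l[j] = true
    · rw [if_pos hok, if_pos hok]
      have hge := pnEndIdx_ge l (j + 1)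
      have hE : pnEndIdx l (j + 1) - j = (pnEndIdx l (j + 1) - (j + 1)) + 1 := by omega
      rw [hE, List.take_succ_cons, ih (j + 1) (by omega)]
    · rw [if_neg hok, if_neg hok]
      simp

-- ===== VERDICT (by name: the statement is the Claim_ definition above) =====
theorem extractPhoneNumber_spec : Claim_equal_extractPhoneNumber := by
  intro s _
  unfold Spec_extractPhoneNumber extractPhoneNumber extractPhoneNumber_alt
  simp only [pnLoopA_inactive]
  rw [pnEndIdx_take, pnSkipIdx_drop, List.drop_zero]
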